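-- pv_equiv track=rewrite | github.com/gitboy2022/PYTHON | USACO Grind/Class 13/HW#2.py | losingPlayer
-- ===== SOURCE A (Python) =====
-- def losingPlayer(x: int, y: int) -> str:
--     turn = 0
--     while True:
--         x -= 1; y -= 4
--         if x >= 0 and y >= 0:
--             turn +=1
--         elif turn % 2 == 0:
--             return "Bob"
--         else:
--             return "Alice"
-- ===== SOURCE B (Python) =====
-- def losingPlayer(x: int, y: int) -> str:
--     turns = max(0, min(x, y // 4))
--     return "Bob" if turns % 2 == 0 else "Alice"
-- ===== Notes on version B (the rewrite author's own statement) =====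
-- stated objective: faster
-- what changed: Replaces the step-by-step decrement simulation loop with the closed form turns = max(0, min(x, y//4)) and a parity test.
import Mathlib
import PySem

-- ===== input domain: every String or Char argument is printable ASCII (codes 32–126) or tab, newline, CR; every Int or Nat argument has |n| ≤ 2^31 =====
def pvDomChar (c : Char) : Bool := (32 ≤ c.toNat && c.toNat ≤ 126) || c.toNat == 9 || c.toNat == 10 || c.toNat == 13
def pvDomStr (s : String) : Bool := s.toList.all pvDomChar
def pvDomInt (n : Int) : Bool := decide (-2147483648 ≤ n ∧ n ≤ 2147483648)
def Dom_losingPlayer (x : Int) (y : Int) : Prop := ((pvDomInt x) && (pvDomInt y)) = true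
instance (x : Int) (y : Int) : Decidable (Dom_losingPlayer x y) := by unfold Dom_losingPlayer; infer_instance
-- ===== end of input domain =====

-- B replaces A's step-by-step decrement loop with the closed form max(0, min(x, y//4)) + parity test (O(1)).

-- ===== PORT A =====
-- the while-True loop: each pass does x -= 1; y -= 4, then branches exactly as A does
def losingPlayerLoop (x : Int) (y : Int) (turn : Int) : String :=
  let x' := x - 1
  let y' := y - 4
  if x' ≥ 0 ∧ y' ≥ 0 then
    losingPlayerLoop x' y' (turn + 1)
  else if PySem.Int.mod turn 2 = 0 then "Bob" else "Alice"
termination_by x.toNat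
decreasing_by omega

def losingPlayer (x : Int) (y : Int) : String :=
  losingPlayerLoop x y 0

-- ===== PORT B =====
def losingPlayer_alt (x : Int) (y : Int) : String :=
  let turns := max 0 (min x (PySem.Int.floordiv y 4))
  if PySem.Int.mod turns 2 = 0 then "Bob" else "Alice"

-- ===== PRECONDITION & SPEC =====
def Spec_losingPlayer (x : Int) (y : Int) (out : String) : Prop := out = losingPlayer_alt x y
instance (x : Int) (y : Int) (out : String) : Decidable (Spec_losingPlayer x y out) := by unfold Spec_losingPlayer; infer_instance

-- ===== CLAIM (what is proved, stated in full; the proofs are below) =====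
def Claim_equal_losingPlayer : Prop := ∀ (x : Int) (y : Int), Dom_losingPlayer x y → Spec_losingPlayer x y (losingPlayer x y)

-- ===== LEMMAS AND PROOFS =====

-- the loop computes the parity of turn + max(0, min(x, y//4))
theorem losingPlayerLoop_eq (n : Nat) (x y turn : Int) (hn : x.toNat ≤ n) :
    losingPlayerLoop x y turn =
      (if PySem.Int.mod (turn + max 0 (min x (PySem.Int.floordiv y 4))) 2 = 0
       then "Bob" else "Alice") := by
  induction n generalizing x y turn with
  | zero =>
    rw [losingPlayerLoop]
    have hx : x ≤ 0 := by omega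
    have h4 : PySem.Int.floordiv y 4 = y / 4 := PySem.Int.floordiv_eq_ediv_of_pos (by omega)
    have h : ¬ (x - 1 ≥ 0 ∧ y - 4 ≥ 0) := by omega
    rw [if_neg h]
    have hmax : max 0 (min x (PySem.Int.floordiv y 4)) = 0 := by
      rw [h4]; omega
    rw [hmax, add_zero]
  | succ m ih =>
    rw [losingPlayerLoop]
    have h4 : PySem.Int.floordiv y 4 = y / 4 := PySem.Int.floordiv_eq_ediv_of_pos (by omega)
    have h4' : PySem.Int.floordiv (y - 4) 4 = (y - 4) / 4 := PySem.Int.floordiv_eq_ediv_of_pos (by omega)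
    by_cases h : x - 1 ≥ 0 ∧ y - 4 ≥ 0
    · rw [if_pos h, ih (x - 1) (y - 4) (turn + 1) (by omega)]
      have hdiv : (y - 4) / 4 = y / 4 - 1 := by omega
      have hy1 : 1 ≤ y / 4 := by omega
      have hmax : turn + 1 + max 0 (min (x - 1) (PySem.Int.floordiv (y - 4) 4))
          = turn + max 0 (min x (PySem.Int.floordiv y 4)) := by
        rw [h4, h4', hdiv]; omega
      rw [hmax]
    · rw [if_neg h]
      have hmax : max 0 (min x (PySem.Int.floordiv y 4)) = 0 := by
        rw [h4]; omega
      rw [hmax, add_zero]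

-- ===== VERDICT (by name: the statement is the Claim_ definition above) =====
theorem losingPlayer_spec : Claim_equal_losingPlayer := by
  intro x y _
  unfold Spec_losingPlayer losingPlayer losingPlayer_alt
  rw [losingPlayerLoop_eq x.toNat x y 0 le_rfl, zero_add]
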